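-- pv_equiv track=rewrite | github.com/cirosantilli/project-euler-solutions | solvers/811.py | one_positions_via_binom
-- ===== SOURCE A (Python) =====
-- def one_positions_via_binom(t: int, r: int) -> list[int]:
--     """
--     Positions of 1-bits in (2^t + 1)^r, assuming blocks do not overlap:
--       (1 + 2^t)^r = sum_{k=0..r} C(r,k) * 2^(k*t)
--     If t is at least the maximum bit-length of C(r,k), these shifted blocks are disjoint,
--     so the binary representation is just the union of the bits of each C(r,k), shifted by k*t.
--     """
--     pos: list[int] = []
--     c = 1  # C(r,0)
--     for k in range(r + 1):
--         x = c
--         # extract set bits from low to high; yields increasing bit indices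
--         while x:
--             lsb = x & -x
--             bit = lsb.bit_length() - 1
--             pos.append(k * t + bit)
--             x -= lsb
--         if k < r:
--             c = c * (r - k) // (k + 1)
--     return pos
-- ===== SOURCE B (Python) =====
-- def one_positions_via_binom(t: int, r: int) -> list[int]:
--     if r < 0:
--         return []
--     # Build Pascal's triangle additively: after r steps, row = [C(r,0), ..., C(r,r)]
--     row = [1]
--     for _ in range(r):
--         row = [a + b for a, b in zip([0] + row, row + [0])]
--     pos = []
--     for k, c in enumerate(row):
--         for bit in range(c.bit_length()):
--             if (c >> bit) & 1:
--                 pos.append(k * t + bit)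
--     return pos
-- ===== Notes on version B (the rewrite author's own statement) =====
-- stated objective: alternative
-- what changed: B builds the whole row of Pascal's triangle additively (r zip-sum steps) instead of A's in-loop multiplicative C(r,k) recurrence with exact floor division, and extracts set bits with a bounded for-loop over range(bit_length) testing (c>>bit)&1 instead of A's lsb-stripping while loop over x & -x.
import Mathlib
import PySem

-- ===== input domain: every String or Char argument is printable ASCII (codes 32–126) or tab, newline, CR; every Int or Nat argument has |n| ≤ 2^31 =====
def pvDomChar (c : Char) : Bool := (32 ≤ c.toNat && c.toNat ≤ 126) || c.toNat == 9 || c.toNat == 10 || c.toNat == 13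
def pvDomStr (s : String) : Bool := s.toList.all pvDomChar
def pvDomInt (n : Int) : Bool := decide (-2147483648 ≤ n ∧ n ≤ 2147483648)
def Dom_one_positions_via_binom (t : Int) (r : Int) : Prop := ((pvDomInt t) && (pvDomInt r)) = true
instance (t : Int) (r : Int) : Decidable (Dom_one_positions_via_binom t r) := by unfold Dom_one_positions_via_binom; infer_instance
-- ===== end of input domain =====

-- B replaces A's multiplicative binomial recurrence by an additively built Pascal's-triangle row,
-- and A's lsb-stripping while loop by a bounded for-loop over range(bit_length)  (objective: alternative).

-- ===== PORT A =====
-- A's inner 'while x:' loop; fuel = |x| at entry bounds the iteration count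
-- (x strictly decreases by at least 1 each pass, so the fuel never runs out where Python terminates).
def pvABits (t : Int) (k : Int) : Nat → Int → List Int → List Int
  | 0, _, pos => pos
  | fuel + 1, x, pos =>
    if x = 0 then pos
    else
      let lsb := PySem.Int.band x (-x)
      pvABits t k fuel (x - lsb) (pos ++ [k * t + ((PySem.Int.bitLength lsb : Int) - 1)])

def one_positions_via_binom (t : Int) (r : Int) : List Int :=
  ((PySem.List.pyRange 0 (r + 1) 1).foldl
    (fun (st : List Int × Int) (k : Int) =>
      let pos := pvABits t k st.2.natAbs st.2 st.1
      let c := if k < r then PySem.Int.floordiv (st.2 * (r - k)) (k + 1) else st.2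
      (pos, c))
    (([] : List Int), (1 : Int))).1

-- ===== PORT B =====
def one_positions_via_binom_alt (t : Int) (r : Int) : List Int :=
  if r < 0 then []
  else
    let row := (PySem.List.pyRange 0 r 1).foldl
      (fun (row : List Int) (_ : Int) =>
        List.zipWith (· + ·) ((0 : Int) :: row) (row ++ [(0 : Int)]))
      [(1 : Int)]
    (PySem.List.enumerate row 0).foldl
      (fun (pos : List Int) (kc : Int × Int) =>
        (List.range (PySem.Int.bitLength kc.2)).foldl
          (fun (pos : List Int) (bit : Nat) =>
            if PySem.Int.band (kc.2 >>> bit) 1 ≠ 0 then pos ++ [kc.1 * t + (bit : Int)] else pos)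
          pos)
      []

-- ===== PRECONDITION & SPEC =====
def Spec_one_positions_via_binom (t : Int) (r : Int) (out : List Int) : Prop := out = one_positions_via_binom_alt t r
instance (t : Int) (r : Int) (out : List Int) : Decidable (Spec_one_positions_via_binom t r out) := by unfold Spec_one_positions_via_binom; infer_instance

-- ===== CLAIM (what is proved, stated in full; the proofs are below) =====
def Claim_equal_one_positions_via_binom : Prop := ∀ (t : Int) (r : Int), Dom_one_positions_via_binom t r → Spec_one_positions_via_binom t r (one_positions_via_binom t r)

-- ===== LEMMAS AND PROOFS =====

-- index of the lowest set bit of m (for m = 0: 0, unused)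
def pvLowBit (m : Nat) : Nat :=
  if h : m % 2 = 1 ∨ m = 0 then 0 else pvLowBit (m / 2) + 1
termination_by m
decreasing_by exact Nat.div_lt_self (by omega) (by omega)

-- set-bit indices of m, low to high
def pvBitsIdx (m : Nat) : List Nat :=
  if h : m = 0 then []
  else (if m % 2 = 1 then [0] else []) ++ (pvBitsIdx (m / 2)).map (· + 1)
termination_by m
decreasing_by exact Nat.div_lt_self (by omega) (by omega)

-- what one block contributes: the set bits of m, each shifted by K*t
def pvEmit (t K : Int) (m : Nat) : List Int := (pvBitsIdx m).map (fun (b : Nat) => K * t + (b : Int))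

lemma pvLowBit_odd {m : Nat} (h : m % 2 = 1) : pvLowBit m = 0 := by
  rw [pvLowBit]; simp [h]

lemma pvLowBit_even {m : Nat} (h : m % 2 = 0) (h0 : m ≠ 0) : pvLowBit m = pvLowBit (m / 2) + 1 := by
  rw [pvLowBit]; simp [h, h0]

lemma pv_and_odd (q : Nat) : (2 * q + 1) &&& (2 * q) = 2 * q := by
  apply Nat.eq_of_testBit_eq
  intro i
  rw [Nat.testBit_and]
  cases i with
  | zero => simp [Nat.testBit_zero, Nat.mul_add_mod]
  | succ i =>
    rw [Nat.testBit_succ, Nat.testBit_succ]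
    have h1 : (2 * q + 1) / 2 = q := by omega
    have h2 : 2 * q / 2 = q := by omega
    simp [h1, h2]

lemma pv_and_even (q : Nat) (hq : 0 < q) : (2 * q) &&& (2 * q - 1) = 2 * ((q &&& (q - 1))) := by
  apply Nat.eq_of_testBit_eq
  intro i
  rw [Nat.testBit_and]
  cases i with
  | zero => simp [Nat.testBit_zero, Nat.mul_add_mod]
  | succ i =>
    rw [Nat.testBit_succ, Nat.testBit_succ, Nat.testBit_succ]
    have h1 : 2 * q / 2 = q := by omega
    have h2 : (2 * q - 1) / 2 = q - 1 := by omega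
    have h3 : 2 * (q &&& (q-1)) / 2 = q &&& (q-1) := by omega
    rw [h1, h2, h3, Nat.testBit_and]

-- clearing the lowest set bit: m & (m-1) removes exactly 2^pvLowBit m
lemma pv_lsb_eq (m : Nat) (hm : 0 < m) : m - (m &&& (m - 1)) = 2 ^ pvLowBit m := by
  induction m using Nat.strong_induction_on with
  | _ m ih =>
    rcases Nat.even_or_odd m with ⟨q, hq⟩ | ⟨q, hq⟩
    · have hq' : 0 < q := by omega
      subst hq
      have h2 : q + q = 2 * q := by ring
      rw [h2, pv_and_even q hq', pvLowBit_even (by omega) (by omega),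
        show 2 * q / 2 = q by omega, pow_succ]
      have := ih q (by omega) hq'
      have hle : q &&& (q-1) ≤ q := Nat.and_le_left
      omega
    · subst hq
      rw [show 2 * q + 1 - 1 = 2 * q by omega, pv_and_odd q, pvLowBit_odd (by omega)]
      omega

lemma pv_two_pow_lowBit_le (m : Nat) (hm : 0 < m) : 2 ^ pvLowBit m ≤ m := by
  induction m using Nat.strong_induction_on with
  | _ m ih =>
    rcases Nat.even_or_odd m with ⟨q, hq⟩ | ⟨q, hq⟩
    · have hq' : 0 < q := by omega
      subst hq
      rw [pvLowBit_even (by omega) (by omega), show (q + q) / 2 = q by omega, pow_succ]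
      have := ih q (by omega) hq'
      omega
    · subst hq
      rw [pvLowBit_odd (by omega)]
      omega

lemma pv_bitLength_two_pow (e : Nat) : PySem.Int.bitLength ((2 ^ e : Nat) : Int) = e + 1 := by
  induction e with
  | zero => decide
  | succ e ih =>
    rw [PySem.Int.bitLength_natCast (by positivity), show 2 ^ (e+1) / 2 = 2 ^ e by
      rw [pow_succ]; omega, ih]

-- Python's  x & -x  for a positive x, through PySem's two's-complement band
lemma pv_band_neg (m : Nat) (h : 0 < m) :
    PySem.Int.band (m : Int) (-(m : Int)) = ((m - (m &&& (m - 1)) : Nat) : Int) := by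
  simp [PySem.Int.band]
  omega

lemma pvBitsIdx_two_mul (s : Nat) : pvBitsIdx (2 * s) = (pvBitsIdx s).map (· + 1) := by
  by_cases h : s = 0
  · subst h; rw [pvBitsIdx]; simp
  · rw [pvBitsIdx]
    simp [h, Nat.mul_div_cancel_left, Nat.mul_mod_right]

lemma pvBitsIdx_cons (m : Nat) (hm : 0 < m) :
    pvBitsIdx m = pvLowBit m :: pvBitsIdx (m - 2 ^ pvLowBit m) := by
  induction m using Nat.strong_induction_on with
  | _ m ih =>
    rcases Nat.even_or_odd m with ⟨q, hq⟩ | ⟨q, hq⟩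
    · have hq' : 0 < q := by omega
      have h2 : m = 2 * q := by omega
      subst h2
      rw [pvBitsIdx_two_mul, pvLowBit_even (by omega) (by omega), show 2 * q / 2 = q by omega,
        ih q (by omega) hq', pow_succ,
        show 2 * q - 2 ^ pvLowBit q * 2 = 2 * (q - 2 ^ pvLowBit q) by omega, pvBitsIdx_two_mul]
      simp
    · subst hq
      rw [pvLowBit_odd (by omega), pvBitsIdx]
      simp [show ¬ (2 * q + 1 = 0) by omega, show (2*q+1) % 2 = 1 by omega]
      rw [show (2 * q + 1) / 2 = q by omega, ← pvBitsIdx_two_mul]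

-- A's while loop produces the set-bit indices of m, shifted by k*t
lemma pvABits_eq (t k : Int) :
    ∀ m fuel (pos : List Int), m ≤ fuel →
      pvABits t k fuel (m : Int) pos = pos ++ pvEmit t k m := by
  intro m
  induction m using Nat.strong_induction_on with
  | _ m ih =>
    intro fuel pos hf
    by_cases h0 : m = 0
    · subst h0
      cases fuel with
      | zero => simp [pvABits, pvEmit, pvBitsIdx]
      | succ f => simp [pvABits, pvEmit, pvBitsIdx]
    · have hm : 0 < m := by omega
      cases fuel with
      | zero => omega
      | succ f =>
        rw [pvABits]
        simp only [show ((m : Int) ≠ 0) by exact_mod_cast h0, if_neg]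
        rw [pv_band_neg m hm, pv_lsb_eq m hm, pv_bitLength_two_pow]
        have hle := pv_two_pow_lowBit_le m hm
        have hxx : (m : Int) - ((2 ^ pvLowBit m : Nat) : Int) = ((m - 2 ^ pvLowBit m : Nat) : Int) := by
          push_cast [Nat.cast_sub hle]; ring
        rw [hxx, ih (m - 2 ^ pvLowBit m) (by have := Nat.one_le_two_pow (n := pvLowBit m); omega) f
          (pos ++ _) (by have := Nat.one_le_two_pow (n := pvLowBit m); omega)]
        rw [pvEmit, pvEmit, pvBitsIdx_cons m hm]
        simp [List.append_assoc]

-- the set bits of m below its bit length, in order, are exactly pvBitsIdx m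
lemma pv_filter_testBit (m : Nat) :
    (List.range (PySem.Int.bitLength (m : Int))).filter (fun i => m.testBit i) = pvBitsIdx m := by
  induction m using Nat.strong_induction_on with
  | _ m ih =>
    by_cases h0 : m = 0
    · subst h0; simp [pvBitsIdx]
    · rw [PySem.Int.bitLength_natCast (by omega), pvBitsIdx]
      rw [List.range_succ_eq_map, List.filter_cons]
      have hsucc : ∀ i : Nat, m.testBit (Nat.succ i) = (m / 2).testBit i := fun i => Nat.testBit_succ m i
      rw [List.filter_map]
      have hcomp : ((fun i => m.testBit i) ∘ Nat.succ) = fun i => (m / 2).testBit i := by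
        funext i; simp [Function.comp, hsucc]
      rw [hcomp, ih (m / 2) (Nat.div_lt_self (by omega) (by omega))]
      simp [h0, Nat.testBit_zero, Nat.succ_eq_add_one]
      by_cases hp : m % 2 = 1 <;> simp [hp]

-- B's inner bounded loop produces the set-bit indices of m, shifted by K*t
lemma pvBLoop_eq (t K : Int) (m : Nat) (pos : List Int) :
    (List.range (PySem.Int.bitLength (m : Int))).foldl
        (fun (pos : List Int) (bit : Nat) =>
          if PySem.Int.band ((m : Int) >>> bit) 1 ≠ 0 then pos ++ [K * t + (bit : Int)] else pos)
        pos
      = pos ++ pvEmit t K m := by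
  have hcond : ∀ bit : Nat, (PySem.Int.band ((m : Int) >>> bit) 1 ≠ 0) ↔ m.testBit bit = true := by
    intro bit
    have hsh : ((m : Int) >>> bit) = ((m >>> bit : Nat) : Int) := by
      rw [Nat.shiftRight_eq_div_pow, Int.shiftRight_eq_div_pow]; push_cast; rfl
    rw [hsh, show (1 : Int) = ((1 : Nat) : Int) from rfl, PySem.Int.band_natCast]
    rw [Nat.testBit_eq_decide_div_mod_eq, Nat.and_one_is_mod, Nat.shiftRight_eq_div_pow]
    simp only [ne_eq, Nat.cast_eq_zero, decide_eq_true_eq]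
    omega
  have hstep : (fun (pos : List Int) (bit : Nat) =>
      if PySem.Int.band ((m : Int) >>> bit) 1 ≠ 0 then pos ++ [K * t + (bit : Int)] else pos)
    = fun (pos : List Int) (bit : Nat) =>
      if (fun i => m.testBit i) bit = true then pos ++ [(fun (b : Nat) => K * t + (b : Int)) bit] else pos := by
    funext pos bit
    by_cases h : m.testBit bit = true
    · simp [h, (hcond bit).mpr h]
    · have : ¬ (PySem.Int.band ((m : Int) >>> bit) 1 ≠ 0) := fun hc => h ((hcond bit).mp hc)
      simp [h, this]
  rw [hstep,
    PySem.List.foldl_append_if (fun i => m.testBit i) (fun (b : Nat) => K * t + (b : Int))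
      (List.range (PySem.Int.bitLength (m : Int))) pos,
    pv_filter_testBit, pvEmit]

lemma pv_enumerate_map_range {α : Type} (f : Nat → α) :
    ∀ (n : Nat) (s : Int), PySem.List.enumerate ((List.range n).map f) s
      = (List.range n).map (fun (k : Nat) => (s + (k : Int), f k)) := by
  intro n
  induction n generalizing f with
  | zero => intro s; simp [PySem.List.enumerate]
  | succ n ih =>
    intro s
    rw [List.range_succ_eq_map, List.map_cons, PySem.List.enumerate_cons, List.map_map,
      ih (f ∘ Nat.succ), List.map_cons, List.map_map]
    congr 1
    · simp
    · apply List.map_congr_left; intro k _; simp [Function.comp]; ring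

-- Pascal's rule: one additive step takes row n to row n+1
lemma pvPascal_step (n : Nat) :
    List.zipWith (· + ·) ((0 : Int) :: (List.range (n + 1)).map (fun (k : Nat) => ((n.choose k : Nat) : Int)))
        ((List.range (n + 1)).map (fun (k : Nat) => ((n.choose k : Nat) : Int)) ++ [(0 : Int)])
      = (List.range (n + 2)).map (fun (k : Nat) => (((n + 1).choose k : Nat) : Int)) := by
  apply List.ext_getElem
  · simp
  · intro i h1 h2
    have hlen : i < n + 2 := by simpa using h2
    simp only [List.getElem_zipWith, List.getElem_map, List.getElem_range]
    rcases Nat.eq_zero_or_pos i with hi | hi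
    · subst hi
      simp [List.getElem_append]
    · obtain ⟨j, rfl⟩ : ∃ j, i = j + 1 := ⟨i - 1, by omega⟩
      have hj : j < n + 1 := by omega
      rw [List.getElem_cons_succ, List.getElem_map, List.getElem_range, List.getElem_append]
      by_cases h : j + 1 < n + 1
      · rw [dif_pos (by simpa using h), List.getElem_map, List.getElem_range,
          Nat.choose_succ_succ' n j]
        push_cast
        ring
      · have hjn : j = n := by omega
        subst hjn
        rw [dif_neg (by simp)]
        simp [Nat.choose_self, Nat.choose_succ_self_right]

lemma pv_foldl_const {α β : Type} (g : β → β) (l : List α) (init : β) :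
    l.foldl (fun s _ => g s) init = g^[l.length] init := by
  induction l generalizing init with
  | nil => rfl
  | cons x xs ih => simp [List.foldl_cons, ih, Function.iterate_succ_apply]

-- after n additive steps the row is [C(n,0), …, C(n,n)]
lemma pvPascal_iterate (n : Nat) :
    (fun (row : List Int) => List.zipWith (· + ·) ((0 : Int) :: row) (row ++ [(0 : Int)]))^[n] [(1 : Int)]
      = (List.range (n + 1)).map (fun (k : Nat) => ((n.choose k : Nat) : Int)) := by
  induction n with
  | zero => simp
  | succ n ih => rw [Function.iterate_succ_apply', ih, pvPascal_step]

-- A's outer fold, with the binomial-coefficient invariant on the carried c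
lemma pvAFold (t : Int) (n : Nat) :
    ∀ cnt j (pos : List Int), j + cnt = n + 1 →
      ((List.range' j cnt).foldl
        (fun (st : List Int × Int) (k : Nat) =>
          (pvABits t (k : Int) st.2.natAbs st.2 st.1,
           if (k : Int) < (n : Int) then PySem.Int.floordiv (st.2 * ((n : Int) - (k : Int))) ((k : Int) + 1) else st.2))
        (pos, ((n.choose j : Nat) : Int))).1
      = pos ++ (List.range' j cnt).flatMap (fun (k : Nat) => pvEmit t (k : Int) (n.choose k)) := by
  intro cnt
  induction cnt with
  | zero => intro j pos h; simp
  | succ c ihc =>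
    intro j pos h
    rw [List.range'_succ, List.foldl_cons, List.flatMap_cons]
    have hA : pvABits t (j : Int) (n.choose j) ((n.choose j : Nat) : Int) pos
        = pos ++ pvEmit t (j : Int) (n.choose j) :=
      pvABits_eq t (j : Int) (n.choose j) (n.choose j) pos le_rfl
    cases c with
    | zero =>
      simp only [List.range'_zero, List.foldl_nil, List.flatMap_nil]
      simp [Int.natAbs_natCast, hA]
    | succ c' =>
      have hjn : j < n := by omega
      have hcond : ((j : Int) < (n : Int)) := by exact_mod_cast hjn
      have hnext : (if (j : Int) < (n : Int) then
            PySem.Int.floordiv (((n.choose j : Nat) : Int) * ((n : Int) - (j : Int))) ((j : Int) + 1)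
          else ((n.choose j : Nat) : Int)) = ((n.choose (j+1) : Nat) : Int) := by
        rw [if_pos hcond]
        have h1 : (((n.choose j : Nat) : Int) * ((n : Int) - (j : Int))) = ((n.choose j * (n - j) : Nat) : Int) := by
          push_cast [Nat.cast_sub (le_of_lt hjn)]; ring
        have h2 : ((j : Int) + 1) = ((j + 1 : Nat) : Int) := by push_cast; ring
        rw [h1, h2, PySem.Int.floordiv_natCast]
        congr 1
        rw [← Nat.choose_succ_right_eq n j]
        exact Nat.mul_div_cancel _ (Nat.succ_pos j)
      simp only [Int.natAbs_natCast, hA, hnext]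
      rw [ihc (j+1) (pos ++ pvEmit t (j : Int) (n.choose j)) (by omega)]
      simp [List.append_assoc]

lemma pv_main (t r : Int) : one_positions_via_binom t r = one_positions_via_binom_alt t r := by
  by_cases hr : r < 0
  · rw [one_positions_via_binom, one_positions_via_binom_alt, if_pos hr]
    rw [PySem.List.pyRange_of_pos (a := 0) (b := r + 1) (s := 1) (by omega)]
    rw [if_neg (by omega)]
    simp
  · have hr' : 0 ≤ r := not_lt.mp hr
    obtain ⟨n, rfl⟩ : ∃ n : Nat, r = (n : Int) := ⟨r.toNat, (Int.toNat_of_nonneg hr').symm⟩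
    rw [one_positions_via_binom, one_positions_via_binom_alt, if_neg (by omega)]
    -- A's side: the whole fold emits each binomial's bits in order
    have hA : ((PySem.List.pyRange 0 ((n : Int) + 1) 1).foldl
        (fun (st : List Int × Int) (k : Int) =>
          (pvABits t k st.2.natAbs st.2 st.1,
           if k < (n : Int) then PySem.Int.floordiv (st.2 * ((n : Int) - k)) (k + 1) else st.2))
        (([] : List Int), (1 : Int))).1
        = (List.range (n+1)).flatMap (fun (k : Nat) => pvEmit t (k : Int) (n.choose k)) := by
      rw [show ((n : Int) + 1) = ((n + 1 : Nat) : Int) by push_cast; ring,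
        PySem.List.pyRange_zero_natCast, List.foldl_map]
      rw [List.range_eq_range']
      have := pvAFold t n (n+1) 0 [] (by omega)
      simp only [Nat.choose_zero_right, Nat.cast_one] at this
      rw [this]
      simp
    rw [hA]
    -- B's side: the Pascal row is the binomials, and its fold emits the same blocks
    have hrow : (PySem.List.pyRange 0 ((n : Nat) : Int) 1).foldl
        (fun (row : List Int) (_ : Int) =>
          List.zipWith (· + ·) ((0 : Int) :: row) (row ++ [(0 : Int)]))
        [(1 : Int)]
        = (List.range (n + 1)).map (fun (k : Nat) => ((n.choose k : Nat) : Int)) := by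
      rw [PySem.List.pyRange_zero_natCast, pv_foldl_const, List.length_map, List.length_range,
        pvPascal_iterate]
    simp only [hrow]
    rw [pv_enumerate_map_range]
    rw [List.foldl_map]
    symm
    have hB : ∀ (k : Nat) (pos : List Int),
        (List.range (PySem.Int.bitLength ((0 : Int) + (k : Int), ((n.choose k : Nat) : Int)).2)).foldl
          (fun (pos : List Int) (bit : Nat) =>
            if PySem.Int.band (((0 : Int) + (k : Int), ((n.choose k : Nat) : Int)).2 >>> bit) 1 ≠ 0
            then pos ++ [((0 : Int) + (k : Int), ((n.choose k : Nat) : Int)).1 * t + (bit : Int)] else pos)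
          pos = pos ++ pvEmit t (k : Int) (n.choose k) := by
      intro k pos
      simp only [zero_add]
      exact pvBLoop_eq t (k : Int) (n.choose k) pos
    calc (List.range (n+1)).foldl _ ([] : List Int)
        = (List.range (n+1)).foldl (fun (pos : List Int) (k : Nat) => pos ++ pvEmit t (k : Int) (n.choose k)) [] := by
          congr 1
          funext pos k
          exact hB k pos
      _ = (List.range (n+1)).flatMap (fun (k : Nat) => pvEmit t (k : Int) (n.choose k)) := by
          rw [PySem.List.foldl_append_eq_flatMap]
          simp

-- ===== VERDICT (by name: the statement is the Claim_ definition above) =====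
theorem one_positions_via_binom_spec : Claim_equal_one_positions_via_binom := by
  intro t r _
  unfold Spec_one_positions_via_binom
  exact pv_main t r
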